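-- pv_equiv track=rewrite | github.com/Waynefn/short-algorithms | choose.py | choose2
-- ===== SOURCE A (Python) =====
-- def choose2(a):
--     flag=0
--     sum=[0,0]
--     for i in range(len(a)):
--         if a[i]>0:
--             sum[int((flag&2)/2)]+=a[i]
--             flag=int(2-flag&2)
--         else:
--             flag=0
--     return max(sum)
-- ===== SOURCE B (Python) =====
-- def choose2(a):
--     # Phase 1: split a into the maximal runs of consecutive positive elements.
--     runs, cur = [], []
--     for x in a:
--         if x > 0:
--             cur.append(x)
--         elif cur:
--             runs.append(cur)
--             cur = []
--     if cur:
--         runs.append(cur)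
--     # Phase 2: within each run, even positions feed s[0], odd positions s[1].
--     s = [0, 0]
--     for r in runs:
--         for j, x in enumerate(r):
--             s[j % 2] += x
--     return max(s)
-- ===== Notes on version B (the rewrite author's own statement) =====
-- stated objective: alternative
-- what changed: B first materialises the maximal runs of consecutive positive elements, then sums each run by position parity into the two accumulators, instead of A's single flat pass driven by a bit-twiddled flag register.
import Mathlib
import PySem

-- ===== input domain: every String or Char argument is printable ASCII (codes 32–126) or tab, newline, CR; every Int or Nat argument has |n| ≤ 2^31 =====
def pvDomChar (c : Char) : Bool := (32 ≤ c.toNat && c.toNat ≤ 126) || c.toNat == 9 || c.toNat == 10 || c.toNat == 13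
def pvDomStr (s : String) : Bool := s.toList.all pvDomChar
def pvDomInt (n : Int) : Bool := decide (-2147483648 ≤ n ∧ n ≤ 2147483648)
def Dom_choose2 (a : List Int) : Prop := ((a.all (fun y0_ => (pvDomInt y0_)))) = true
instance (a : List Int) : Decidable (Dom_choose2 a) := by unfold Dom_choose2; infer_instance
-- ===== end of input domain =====

-- B replaces A's flat flag-driven pass by a runs-then-parity-sum decomposition (objective: alternative).

-- ===== PORT A =====
-- 'for i in range(len(a))' only reads a[i] in order, ported as structural recursion over the list.
-- State is (flag, sum0, sum1).  'int((flag&2)/2)' / 'int(2-flag&2)' are ported with Lean's Int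
-- operations; exact here since flag&&&2 ∈ {0,2} is even and nonnegative.
def choose2Loop : List Int → Int × Int × Int → Int × Int × Int
  | [], st => st
  | x :: xs, (flag, s0, s1) =>
    if x > 0 then
      choose2Loop xs
        ((PySem.Int.band (2 - flag) 2),
         (if (PySem.Int.band flag 2) / 2 == 0 then s0 + x else s0),
         (if (PySem.Int.band flag 2) / 2 == 0 then s1 else s1 + x))
    else
      choose2Loop xs (0, s0, s1)

-- max(sum) over the two-element list [sum0, sum1]
def choose2 (a : List Int) : Int :=
  let st := choose2Loop a (0, 0, 0)
  max st.2.1 st.2.2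

-- ===== PORT B =====
-- Phase 1 loop: build (runs, cur), the maximal runs of consecutive positive elements.
def choose2AltRuns : List Int → List (List Int) × List Int → List (List Int) × List Int
  | [], st => st
  | x :: xs, (runs, cur) =>
    if x > 0 then choose2AltRuns xs (runs, cur ++ [x])
    else if cur ≠ [] then choose2AltRuns xs (runs ++ [cur], [])
    else choose2AltRuns xs (runs, cur)

-- Phase 2 inner loop: 'for j, x in enumerate(r): s[j % 2] += x'
def choose2AltRunPass (s : Int × Int) (r : List Int) : Int × Int :=
  (PySem.List.enumerate r).foldl
    (fun s jx => if PySem.Int.mod jx.1 2 == 0 then (s.1 + jx.2, s.2) else (s.1, s.2 + jx.2)) s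

def choose2_alt (a : List Int) : Int :=
  let st := choose2AltRuns a ([], [])
  let runs := if st.2 ≠ [] then st.1 ++ [st.2] else st.1
  let s := runs.foldl choose2AltRunPass (0, 0)
  max s.1 s.2

-- ===== PRECONDITION & SPEC =====
def Spec_choose2 (a : List Int) (out : Int) : Prop := out = choose2_alt a
instance (a : List Int) (out : Int) : Decidable (Spec_choose2 a out) := by unfold Spec_choose2; infer_instance

-- ===== CLAIM (what is proved, stated in full; the proofs are below) =====
def Claim_equal_choose2 : Prop := ∀ (a : List Int), Dom_choose2 a → Spec_choose2 a (choose2 a)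

-- ===== LEMMAS AND PROOFS =====

-- Reference function: (even-position sum, odd-position sum) of the positive elements,
-- parity counted within the current run; b = true means the next positive goes to the odd slot.
def specGo : List Int → Bool → Int × Int
  | [], _ => (0, 0)
  | x :: xs, b =>
    if x > 0 then
      let p := specGo xs (!b)
      if b then (p.1, p.2 + x) else (p.1 + x, p.2)
    else specGo xs false

-- The run list that B's phase-1 loop ultimately produces, given the pending run 'cur'.
def runsFrom : List Int → List Int → List (List Int)
  | cur, [] => if cur ≠ [] then [cur] else []
  | cur, x :: xs =>
    if x > 0 then runsFrom (cur ++ [x]) xs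
    else if cur ≠ [] then cur :: runsFrom [] xs
    else runsFrom [] xs

theorem choose2Loop_specGo (xs : List Int) :
    ∀ (b : Bool) (s0 s1 : Int), ∃ b' : Bool,
      choose2Loop xs ((if b then 2 else 0), s0, s1) =
        ((if b' then 2 else 0), s0 + (specGo xs b).1, s1 + (specGo xs b).2) := by
  induction xs with
  | nil => intro b s0 s1; exact ⟨b, by simp [choose2Loop, specGo]⟩
  | cons x xs ih =>
    intro b s0 s1
    by_cases hx : x > 0
    · cases b with
      | false =>
        obtain ⟨b', hb'⟩ := ih true (s0 + x) s1
        refine ⟨b', ?_⟩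
        simp only [choose2Loop, if_pos hx]
        norm_num [show PySem.Int.band 0 2 = 0 by decide, show PySem.Int.band 2 2 = 2 by decide]
        norm_num at hb'
        rw [hb']
        have h1 : specGo (x :: xs) false = ((specGo xs true).1 + x, (specGo xs true).2) := by
          simp [specGo, hx]
        rw [h1]
        simp [Prod.ext_iff, add_assoc, add_comm, add_left_comm]
      | true =>
        obtain ⟨b', hb'⟩ := ih false s0 (s1 + x)
        refine ⟨b', ?_⟩
        simp only [choose2Loop, if_pos hx]
        norm_num [show PySem.Int.band 2 2 = 2 by decide, show PySem.Int.band 0 2 = 0 by decide]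
        norm_num at hb'
        rw [hb']
        have h1 : specGo (x :: xs) true = ((specGo xs false).1, (specGo xs false).2 + x) := by
          simp [specGo, hx]
        rw [h1]
        simp [Prod.ext_iff, add_assoc, add_comm, add_left_comm]
    · obtain ⟨b', hb'⟩ := ih false s0 s1
      refine ⟨b', ?_⟩
      simp only [choose2Loop, if_neg hx, specGo, hx]
      simpa using hb'
  
theorem choose2AltRuns_runsFrom (xs : List Int) :
    ∀ (runs : List (List Int)) (cur : List Int),
      (let st := choose2AltRuns xs (runs, cur);
       if st.2 ≠ [] then st.1 ++ [st.2] else st.1) = runs ++ runsFrom cur xs := by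
  induction xs with
  | nil =>
    intro runs cur
    simp only [choose2AltRuns, runsFrom]
    split <;> simp_all
  | cons x xs ih =>
    intro runs cur
    simp only [choose2AltRuns, runsFrom]
    by_cases hx : x > 0
    · simp [hx, ih]
    · by_cases hc : cur ≠ []
      · simp [hx, hc, ih]
      · simp only [ne_eq, not_not] at hc
        subst hc
        simp [hx, ih]

-- additivity of the inner enumerate fold in its accumulator
theorem runPass_shift (l : List (Int × Int)) : ∀ (s t : Int × Int),
    l.foldl (fun s jx => if PySem.Int.mod jx.1 2 == 0 then (s.1 + jx.2, s.2) else (s.1, s.2 + jx.2)) (s.1 + t.1, s.2 + t.2)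
      = ((l.foldl (fun s jx => if PySem.Int.mod jx.1 2 == 0 then (s.1 + jx.2, s.2) else (s.1, s.2 + jx.2)) t).1 + s.1,
         (l.foldl (fun s jx => if PySem.Int.mod jx.1 2 == 0 then (s.1 + jx.2, s.2) else (s.1, s.2 + jx.2)) t).2 + s.2) := by
  induction l with
  | nil => intro s t; simp [add_comm]
  | cons p l ih =>
    intro s t
    simp only [List.foldl_cons]
    split
    · have := ih s (t.1 + p.2, t.2)
      simpa [add_comm, add_left_comm, add_assoc] using this
    · have := ih s (t.1, t.2 + p.2)
      simpa [add_comm, add_left_comm, add_assoc] using this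

theorem runPass_add (s : Int × Int) (r : List Int) :
    choose2AltRunPass s r = ((choose2AltRunPass (0,0) r).1 + s.1, (choose2AltRunPass (0,0) r).2 + s.2) := by
  have := runPass_shift (PySem.List.enumerate r) s (0,0)
  simpa [choose2AltRunPass] using this

def totRuns (rs : List (List Int)) : Int × Int := rs.foldl choose2AltRunPass (0, 0)

theorem totRuns_cons (r : List Int) (rs : List (List Int)) :
    totRuns (r :: rs) = ((totRuns rs).1 + (choose2AltRunPass (0,0) r).1,
                         (totRuns rs).2 + (choose2AltRunPass (0,0) r).2) := by
  simp only [totRuns, List.foldl_cons]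
  have h1 : ∀ s : Int × Int, rs.foldl choose2AltRunPass s =
      ((totRuns rs).1 + s.1, (totRuns rs).2 + s.2) := by
    induction rs with
    | nil => intro s; simp [totRuns]
    | cons q qs ih =>
      intro s
      simp only [List.foldl_cons, totRuns] at *
      rw [runPass_add s q, ih, ih ((choose2AltRunPass (0, 0) q))]
      simp [add_comm, add_left_comm, add_assoc]
  rw [h1]
  simp only [totRuns, Prod.mk.injEq]

-- enumerate-based per-run pass, snoc characterisation
theorem runPass_snoc (r : List Int) (x : Int) :
    choose2AltRunPass (0,0) (r ++ [x]) =
      (if r.length % 2 = 0 then ((choose2AltRunPass (0,0) r).1 + x, (choose2AltRunPass (0,0) r).2)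
       else ((choose2AltRunPass (0,0) r).1, (choose2AltRunPass (0,0) r).2 + x)) := by
  simp only [choose2AltRunPass, PySem.List.enumerate_append, List.foldl_append]
  simp only [PySem.List.enumerate, List.foldl_cons, List.foldl_nil]
  rcases Nat.even_or_odd r.length with h | h
  · have h2 : r.length % 2 = 0 := Nat.even_iff.mp h
    simp [h2]
    intro hco
    exact absurd hco (by omega)
  · have h2 : r.length % 2 = 1 := Nat.odd_iff.mp h
    simp [h2]
    intro hco
    exact absurd hco (by omega)

-- parity of cur.length as Bool
theorem totRuns_runsFrom (xs : List Int) : ∀ (cur : List Int),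
    totRuns (runsFrom cur xs) =
      ((choose2AltRunPass (0,0) cur).1 + (specGo xs (cur.length % 2 == 1)).1,
       (choose2AltRunPass (0,0) cur).2 + (specGo xs (cur.length % 2 == 1)).2) := by
  induction xs with
  | nil =>
    intro cur
    simp only [runsFrom, specGo]
    by_cases hc : cur ≠ []
    · simp [hc, totRuns]
    · simp at hc; simp [hc, totRuns, choose2AltRunPass, PySem.List.enumerate]
  | cons x xs ih =>
    intro cur
    by_cases hx : x > 0
    · have hlen : ((cur ++ [x]).length % 2 == 1) = !(cur.length % 2 == 1) := by
        rcases Nat.even_or_odd cur.length with h | h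
        · have h0 : cur.length % 2 = 0 := Nat.even_iff.mp h
          simp [List.length_append, Nat.add_mod, h0]
        · have h0 : cur.length % 2 = 1 := Nat.odd_iff.mp h
          simp [List.length_append, Nat.add_mod, h0]
      have := ih (cur ++ [x])
      rw [hlen] at this
      simp only [runsFrom, if_pos hx, this, runPass_snoc]
      simp only [specGo, if_pos hx]
      by_cases hp : cur.length % 2 = 0
      · have : (cur.length % 2 == 1) = false := by simp; omega
        simp [hp, this, add_comm, add_left_comm, add_assoc]
      · have h1 : cur.length % 2 = 1 := by omega
        have : (cur.length % 2 == 1) = true := by simp [h1]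
        simp [hp, this, add_comm, add_left_comm, add_assoc]
    · have hspec : specGo (x :: xs) (cur.length % 2 == 1) = specGo xs false := by
        simp [specGo, hx]
      rw [hspec]
      by_cases hc : cur ≠ []
      · simp only [runsFrom, if_neg hx, if_pos hc, totRuns_cons]
        have := ih []
        simp only [List.length_nil] at this
        simp only [show ((0 : Nat) % 2 == 1) = false from rfl] at this
        rw [this]
        simp [choose2AltRunPass, PySem.List.enumerate, add_comm, add_left_comm]
      · simp at hc
        subst hc
        simp only [runsFrom, if_neg hx]
        have := ih []
        simp only [List.length_nil] at this
        simp only [show ((0 : Nat) % 2 == 1) = false from rfl] at this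
        simpa [choose2AltRunPass, PySem.List.enumerate] using this

-- ===== VERDICT (by name: the statement is the Claim_ definition above) =====
theorem choose2_spec : Claim_equal_choose2 := by
  intro a _
  unfold Spec_choose2 choose2 choose2_alt
  obtain ⟨b', hA⟩ := choose2Loop_specGo a false 0 0
  simp only [Bool.false_eq_true, if_false] at hA
  rw [hA]
  have hB := choose2AltRuns_runsFrom a [] []
  simp only [List.nil_append] at hB
  have hT := totRuns_runsFrom a []
  simp only [List.length_nil, show ((0 : Nat) % 2 == 1) = false from rfl] at hT
  simp only [choose2AltRunPass, PySem.List.enumerate, List.foldl_nil] at hT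
  simp only [hB]
  show max (0 + (specGo a false).1) (0 + (specGo a false).2)
      = max (totRuns (runsFrom [] a)).1 (totRuns (runsFrom [] a)).2
  rw [hT]
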